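-- pv_equiv track=rewrite | github.com/junhaz4/leetcode-notes | OA&Interview/flexport-vo.py | meeting_schedule
-- ===== SOURCE A (Python) =====
-- def meeting_schedule(slots1,slots2,duration):
--   slots1.sort()
--   slots2.sort()
--   p1, p2 = 0, 0
--   n1, n2 = len(slots1), len(slots2)
--   while p1 < n1 and p2 < n2:
--     right = min(slots1[p1][1], slots2[p2][1])
--     left = max(slots1[p1][0], slots2[p2][0])
--     if right - left >= duration:
--       return [left,left+duration]
--     if slots1[p1][1] > slots2[p2][1]:
--       p2 += 1
--     else:
--       p1 += 1
--   return []
-- ===== SOURCE B (Python) =====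
-- def meeting_schedule(slots1, slots2, duration):
--     slots1.sort()
--     slots2.sort()
--     events = sorted([(s, 0) for s in slots1] + [(s, 1) for s in slots2], key=lambda e: e[0])
--     max_end = [None, None]  # largest end seen so far in each list
--     for slot, which in events:
--         other = max_end[1 - which]
--         if other is not None and min(slot[1], other) - slot[0] >= duration:
--             return [slot[0], slot[0] + duration]
--         if max_end[which] is None or slot[1] > max_end[which]:
--             max_end[which] = slot[1]
--     return []
-- ===== Notes on version B (the rewrite author's own statement) =====
-- stated objective: alternative
-- what changed: Replaces A's two-pointer advancement over the two sorted lists with a single sweep over the merged start-sorted event list that keeps a per-list running maximum end and returns at the first interval whose overlap with the other list's running maximum reaches the duration.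
-- outside the precondition, e.g. on meeting_schedule([[1]], [], 0): A returns [], B raises IndexError
import Mathlib
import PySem

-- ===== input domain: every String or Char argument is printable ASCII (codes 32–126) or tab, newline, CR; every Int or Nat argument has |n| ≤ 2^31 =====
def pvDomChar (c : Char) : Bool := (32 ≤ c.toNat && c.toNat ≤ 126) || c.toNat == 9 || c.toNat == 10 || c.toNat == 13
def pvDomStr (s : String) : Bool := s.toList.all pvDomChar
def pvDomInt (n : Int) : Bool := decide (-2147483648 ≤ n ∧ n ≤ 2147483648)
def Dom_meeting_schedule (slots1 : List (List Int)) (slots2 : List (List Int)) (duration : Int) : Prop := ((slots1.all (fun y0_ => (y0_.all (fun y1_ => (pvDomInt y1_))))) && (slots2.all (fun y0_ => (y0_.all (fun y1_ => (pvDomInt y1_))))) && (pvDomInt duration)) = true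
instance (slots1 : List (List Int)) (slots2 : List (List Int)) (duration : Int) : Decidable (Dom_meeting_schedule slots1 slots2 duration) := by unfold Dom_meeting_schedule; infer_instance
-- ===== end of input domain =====

-- B replaces A's two-pointer advancement with a single sweep over the merged start-sorted
-- events keeping a per-list running maximum end (objective: alternative decomposition; same
-- asymptotic cost). The equivalence proved is about the RETURN value; both Pythons also
-- sort slots1 and slots2 in place, identically.

-- Python's s[i] on an inner slot; Python raises IndexError when the slot is shorter —
-- Pre_ excludes those inputs, so the `.getD 0` default is dead code on the claimed domain.
def pvItem (s : List Int) (i : Nat) : Int := (PySem.List.pyGet? s (i : Int)).getD 0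

-- ===== PORT A =====
-- the `while p1 < n1 and p2 < n2` loop of A, with its two index pointers; the fuel argument
-- only makes the recursion structural (each iteration moves one pointer forward, so
-- n1 + n2 + 1 units are never exhausted) — it does not alter the loop
def msA_go (s1 s2 : List (List Int)) (d : Int) : Nat → Nat → Nat → List Int
  | 0, _, _ => []
  | fuel + 1, p1, p2 =>
    if h : p1 < s1.length ∧ p2 < s2.length then
      let right := min (pvItem s1[p1] 1) (pvItem s2[p2] 1)
      let left := max (pvItem s1[p1] 0) (pvItem s2[p2] 0)
      if d ≤ right - left then [left, left + d]
      else if pvItem s2[p2] 1 < pvItem s1[p1] 1 then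
        msA_go s1 s2 d fuel p1 (p2 + 1)
      else
        msA_go s1 s2 d fuel (p1 + 1) p2
    else []

def meeting_schedule (slots1 : List (List Int)) (slots2 : List (List Int)) (duration : Int) : List Int :=
  msA_go (PySem.List.sorted slots1 (fun x => x) false)
         (PySem.List.sorted slots2 (fun x => x) false) duration
         ((PySem.List.sorted slots1 (fun x => x) false).length +
          (PySem.List.sorted slots2 (fun x => x) false).length + 1) 0 0

-- ===== PORT B =====
-- B's own inner-slot accessor (same Python semantics as pvItem; kept separate so the two
-- ports share no code)
def pvItemB (s : List Int) (i : Nat) : Int := (PySem.List.pyGet? s (i : Int)).getD 0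

-- the `for slot, which in events` sweep of B; m0/m1 are max_end[0]/max_end[1] (None = none);
-- `max_end[1 - which]` / `max_end[which]` are ported as the `which == 0` selections (tags are 0/1)
def msB_loop (events : List (List Int × Int)) (d : Int) (m0 m1 : Option Int) : List Int :=
  match events with
  | [] => []
  | (slot, which) :: rest =>
    let other := if which == 0 then m1 else m0
    let hit := match other with
      | none => false
      | some o => decide (d ≤ min (pvItemB slot 1) o - pvItemB slot 0)
    if hit then [pvItemB slot 0, pvItemB slot 0 + d]
    else
      let cur := if which == 0 then m0 else m1
      let upd : Option Int := match cur with
        | none => some (pvItemB slot 1)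
        | some c => if c < pvItemB slot 1 then some (pvItemB slot 1) else some c
      if which == 0 then msB_loop rest d upd m1 else msB_loop rest d m0 upd

def meeting_schedule_alt (slots1 : List (List Int)) (slots2 : List (List Int)) (duration : Int) : List Int :=
  let s1 := PySem.List.sorted slots1 (fun x => x) false
  let s2 := PySem.List.sorted slots2 (fun x => x) false
  let events := PySem.List.sorted (s1.map (fun s => (s, (0 : Int))) ++ s2.map (fun s => (s, (1 : Int))))
                  (fun e => e.1) false
  msB_loop events duration none none

-- ===== PRECONDITION & SPEC =====
-- Pre_ excludes inputs containing a slot of fewer than two ints: on those A raises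
-- IndexError whenever such a slot is reached by its scan (and B raises too); on the
-- remaining such inputs (the other list empty, so A's loop never runs) A returns []
-- while B, which sweeps every interval, still raises IndexError.
def Pre_meeting_schedule (slots1 : List (List Int)) (slots2 : List (List Int)) (duration : Int) : Prop :=
  ∀ s ∈ slots1 ++ slots2, 2 ≤ s.length
instance (slots1 : List (List Int)) (slots2 : List (List Int)) (duration : Int) : Decidable (Pre_meeting_schedule slots1 slots2 duration) := by unfold Pre_meeting_schedule; infer_instance

def pvWitness_meeting_schedule : List (List Int) × List (List Int) × Int := ([[0, 10]], [[2, 8]], 3)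

def Spec_meeting_schedule (slots1 : List (List Int)) (slots2 : List (List Int)) (duration : Int) (out : List Int) : Prop := out = meeting_schedule_alt slots1 slots2 duration
instance (slots1 : List (List Int)) (slots2 : List (List Int)) (duration : Int) (out : List Int) : Decidable (Spec_meeting_schedule slots1 slots2 duration out) := by unfold Spec_meeting_schedule; infer_instance

-- ===== CLAIM (what is proved, stated in full; the proofs are below) =====
def Claim_equal_meeting_schedule : Prop := ∀ (slots1 : List (List Int)) (slots2 : List (List Int)) (duration : Int), Dom_meeting_schedule slots1 slots2 duration → Pre_meeting_schedule slots1 slots2 duration → Spec_meeting_schedule slots1 slots2 duration (meeting_schedule slots1 slots2 duration)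

-- ===== LEMMAS AND PROOFS =====

-- L is the left end of a feasible common sub-slot of some pair from X × Y
def pvQual (X Y : List (List Int)) (d L : Int) : Prop :=
  ∃ x ∈ X, ∃ y ∈ Y, d ≤ min (pvItem x 1) (pvItem y 1) - max (pvItem x 0) (pvItem y 0) ∧
    L = max (pvItem x 0) (pvItem y 0)

-- the characterisation both loops are proved to satisfy: [] when nothing qualifies,
-- else the MINIMAL qualifying left end
def pvIsAns (X Y : List (List Int)) (d : Int) (r : List Int) : Prop :=
  (r = [] ∧ ∀ L, ¬ pvQual X Y d L) ∨
  (∃ L, pvQual X Y d L ∧ (∀ L', pvQual X Y d L' → L ≤ L') ∧ r = [L, L + d])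

-- m is the running maximum of the ends of the already-swept slots E (none ↔ E = [])
def pvMaxInv (m : Option Int) (E : List (List Int)) : Prop :=
  (m = none ∧ E = []) ∨ ∃ c, m = some c ∧ (∃ s ∈ E, pvItem s 1 = c) ∧ ∀ s ∈ E, pvItem s 1 ≤ c

theorem pvIsAns_unique {X Y : List (List Int)} {d : Int} {r r' : List Int}
    (h : pvIsAns X Y d r) (h' : pvIsAns X Y d r') : r = r' := by
  rcases h with ⟨hr, hn⟩ | ⟨L, hq, hm, hr⟩
  · rcases h' with ⟨hr', _⟩ | ⟨L', hq', _, _⟩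
    · rw [hr, hr']
    · exact absurd hq' (hn L')
  · rcases h' with ⟨_, hn'⟩ | ⟨L', hq', hm', hr'⟩
    · exact absurd hq (hn' L)
    · have : L = L' := le_antisymm (hm L' hq') (hm' L hq)
      rw [hr, hr', this]

theorem pvIsAns_of_qual_iff {X X' Y Y' : List (List Int)} {d : Int} {r : List Int}
    (h : ∀ L, pvQual X Y d L ↔ pvQual X' Y' d L) (ha : pvIsAns X Y d r) :
    pvIsAns X' Y' d r := by
  unfold pvIsAns at ha ⊢
  simp only [← h]
  exact ha

theorem pvQual_swap {X Y : List (List Int)} {d L : Int} :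
    pvQual X Y d L ↔ pvQual Y X d L := by
  unfold pvQual
  constructor <;> rintro ⟨x, hx, y, hy, hq, rfl⟩ <;>
    exact ⟨y, hy, x, hx, by rw [min_comm, max_comm]; exact hq, by rw [max_comm]⟩

theorem pvItem_zero (a b : Int) (t : List Int) : pvItem (a::b::t) 0 = a := by simp [pvItem]

theorem pvLen2 {s : List Int} (h : 2 ≤ s.length) : ∃ a b t, s = a::b::t := by
  rcases s with _ | ⟨a, _ | ⟨b, t⟩⟩ <;> simp at h <;> try omega
  exact ⟨a, b, t, rfl⟩

-- first coordinate is monotone along Python's lexicographic list order, for slots of length ≥ 2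
theorem pvItem0_mono {x y : List Int} (hx : 2 ≤ x.length) (hy : 2 ≤ y.length)
    (h : x ≤ y) : pvItem x 0 ≤ pvItem y 0 := by
  obtain ⟨a, b, t, rfl⟩ := pvLen2 hx
  obtain ⟨c, e, u, rfl⟩ := pvLen2 hy
  rw [pvItem_zero, pvItem_zero]
  by_contra hc
  push_neg at hc
  exact absurd (List.Lex.rel hc : (c::e::u : List Int) < (a::b::t)) (not_lt.mpr h)

-- head's start is minimal among a sorted list of slots
theorem pvHead0_min {x : List Int} {xs : List (List Int)}
    (hp : (x::xs).Pairwise (· ≤ ·)) (hlen : ∀ s ∈ x::xs, 2 ≤ s.length) :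
    ∀ x' ∈ x::xs, pvItem x 0 ≤ pvItem x' 0 := by
  intro x' hx'
  rcases List.mem_cons.mp hx' with rfl | hx'
  · exact le_refl _
  · exact pvItem0_mono (hlen x (by simp)) (hlen x' (by simp [hx']))
      ((List.pairwise_cons.mp hp).1 x' hx')

-- ---------- the A side: the two-pointer loop returns the minimal qualifying left ----------

-- A's loop, rephrased on the two remaining suffixes (proof-side view of msA_go)
def msA_list (X Y : List (List Int)) (d : Int) : List Int :=
  match X, Y with
  | x :: xs, y :: ys =>
    if d ≤ min (pvItem x 1) (pvItem y 1) - max (pvItem x 0) (pvItem y 0) then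
      [max (pvItem x 0) (pvItem y 0), max (pvItem x 0) (pvItem y 0) + d]
    else if pvItem y 1 < pvItem x 1 then msA_list (x :: xs) ys d
    else msA_list xs (y :: ys) d
  | _, _ => []
termination_by X.length + Y.length

theorem msA_list_nil_left (Y : List (List Int)) (d : Int) : msA_list [] Y d = [] := by
  rw [msA_list.eq_def]

theorem msA_list_nil_right (X : List (List Int)) (d : Int) : msA_list X [] d = [] := by
  rw [msA_list.eq_def]; rcases X with _ | ⟨x, xs⟩ <;> rfl

theorem msA_list_cons (x y : List Int) (xs ys : List (List Int)) (d : Int) :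
    msA_list (x::xs) (y::ys) d =
    if d ≤ min (pvItem x 1) (pvItem y 1) - max (pvItem x 0) (pvItem y 0) then
      [max (pvItem x 0) (pvItem y 0), max (pvItem x 0) (pvItem y 0) + d]
    else if pvItem y 1 < pvItem x 1 then msA_list (x :: xs) ys d
    else msA_list xs (y :: ys) d := by
  rw [msA_list.eq_def]

theorem msA_go_eq_list (s1 s2 : List (List Int)) (d : Int) : ∀ (fuel p1 p2 : Nat),
    (s1.length - p1) + (s2.length - p2) < fuel →
    msA_go s1 s2 d fuel p1 p2 = msA_list (s1.drop p1) (s2.drop p2) d := by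
  intro fuel
  induction fuel with
  | zero => intro p1 p2 h; exact absurd h (Nat.not_lt_zero _)
  | succ fuel ih =>
    intro p1 p2 hf
    by_cases h : p1 < s1.length ∧ p2 < s2.length
    · rw [msA_go, dif_pos h]
      show (if d ≤ min (pvItem s1[p1] 1) (pvItem s2[p2] 1) -
              max (pvItem s1[p1] 0) (pvItem s2[p2] 0) then
          [max (pvItem s1[p1] 0) (pvItem s2[p2] 0),
           max (pvItem s1[p1] 0) (pvItem s2[p2] 0) + d]
        else if pvItem s2[p2] 1 < pvItem s1[p1] 1 then msA_go s1 s2 d fuel p1 (p2 + 1)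
        else msA_go s1 s2 d fuel (p1 + 1) p2) = _
      rw [List.drop_eq_getElem_cons h.1, List.drop_eq_getElem_cons h.2, msA_list_cons]
      split_ifs with hhit hadv
      · rfl
      · rw [ih p1 (p2 + 1) (by omega), List.drop_eq_getElem_cons h.1]
      · rw [ih (p1 + 1) p2 (by omega), List.drop_eq_getElem_cons h.2]
    · rw [msA_go, dif_neg h]
      have : s1.length ≤ p1 ∨ s2.length ≤ p2 := by omega
      rcases this with h1 | h2
      · rw [List.drop_eq_nil_of_le h1, msA_list_nil_left]
      · rw [List.drop_eq_nil_of_le h2, msA_list_nil_right]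

-- a dropped second-list head can never form a qualifying pair with what remains
theorem pvQual_drop_right {x y : List Int} {xs ys : List (List Int)} {d : Int}
    (hmin : ∀ x' ∈ x::xs, pvItem x 0 ≤ pvItem x' 0)
    (hno : min (pvItem x 1) (pvItem y 1) - max (pvItem x 0) (pvItem y 0) < d)
    (hy : pvItem y 1 < pvItem x 1) :
    ∀ L, pvQual (x::xs) (y::ys) d L ↔ pvQual (x::xs) ys d L := by
  intro L
  constructor
  · rintro ⟨x', hx', y', hy', hq, hL⟩
    rcases List.mem_cons.mp hy' with rfl | hy'
    · exfalso
      have h1 : min (pvItem x' 1) (pvItem y' 1) ≤ pvItem y' 1 := min_le_right _ _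
      have h2 : max (pvItem x 0) (pvItem y' 0) ≤ max (pvItem x' 0) (pvItem y' 0) :=
        max_le_max (hmin x' hx') le_rfl
      have h3 : min (pvItem x 1) (pvItem y' 1) = pvItem y' 1 := min_eq_right (le_of_lt hy)
      linarith
    · exact ⟨x', hx', y', hy', hq, hL⟩
  · rintro ⟨x', hx', y', hy', hq, hL⟩
    exact ⟨x', hx', y', List.mem_cons_of_mem _ hy', hq, hL⟩

theorem pvQual_drop_left {x y : List Int} {xs ys : List (List Int)} {d : Int}
    (hmin : ∀ y' ∈ y::ys, pvItem y 0 ≤ pvItem y' 0)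
    (hno : min (pvItem x 1) (pvItem y 1) - max (pvItem x 0) (pvItem y 0) < d)
    (hx : pvItem x 1 ≤ pvItem y 1) :
    ∀ L, pvQual (x::xs) (y::ys) d L ↔ pvQual xs (y::ys) d L := by
  intro L
  constructor
  · rintro ⟨x', hx', y', hy', hq, hL⟩
    rcases List.mem_cons.mp hx' with rfl | hx'
    · exfalso
      have h1 : min (pvItem x' 1) (pvItem y' 1) ≤ pvItem x' 1 := min_le_left _ _
      have h2 : max (pvItem x' 0) (pvItem y 0) ≤ max (pvItem x' 0) (pvItem y' 0) :=
        max_le_max le_rfl (hmin y' hy')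
      have h3 : min (pvItem x' 1) (pvItem y 1) = pvItem x' 1 := min_eq_left hx
      linarith
    · exact ⟨x', hx', y', hy', hq, hL⟩
  · rintro ⟨x', hx', y', hy', hq, hL⟩
    exact ⟨x', List.mem_cons_of_mem _ hx', y', hy', hq, hL⟩

theorem msA_list_isAns (d : Int) : ∀ (X : List (List Int)),
    X.Pairwise (· ≤ ·) → (∀ s ∈ X, 2 ≤ s.length) →
    ∀ (Y : List (List Int)), Y.Pairwise (· ≤ ·) → (∀ s ∈ Y, 2 ≤ s.length) →
    pvIsAns X Y d (msA_list X Y d) := by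
  intro X
  induction X with
  | nil =>
    intro _ _ Y _ _
    rw [msA_list_nil_left]
    refine Or.inl ⟨rfl, ?_⟩
    rintro L ⟨x, hx, _⟩
    simp at hx
  | cons x xs ihX =>
    intro hpX hlX Y
    induction Y with
    | nil =>
      intro _ _
      rw [msA_list_nil_right]
      refine Or.inl ⟨rfl, ?_⟩
      rintro L ⟨x', _, y', hy', _⟩
      simp at hy'
    | cons y ys ihY =>
      intro hpY hlY
      rw [msA_list_cons]
      split_ifs with hhit hadv
      · refine Or.inr ⟨max (pvItem x 0) (pvItem y 0), ⟨x, by simp, y, by simp, hhit, rfl⟩, ?_, rfl⟩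
        rintro L' ⟨x', hx', y', hy', _, rfl⟩
        exact max_le_max (pvHead0_min hpX hlX x' hx') (pvHead0_min hpY hlY y' hy')
      · have hpY' := (List.pairwise_cons.mp hpY).2
        have hlY' : ∀ s ∈ ys, 2 ≤ s.length := fun s hs => hlY s (List.mem_cons_of_mem _ hs)
        exact pvIsAns_of_qual_iff
          (fun L => (pvQual_drop_right (pvHead0_min hpX hlX) (not_le.mp hhit) hadv L).symm)
          (ihY hpY' hlY')
      · have hpX' := (List.pairwise_cons.mp hpX).2
        have hlX' : ∀ s ∈ xs, 2 ≤ s.length := fun s hs => hlX s (List.mem_cons_of_mem _ hs)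
        exact pvIsAns_of_qual_iff
          (fun L => (pvQual_drop_left (pvHead0_min hpY hlY) (not_le.mp hhit) (not_lt.mp hadv) L).symm)
          (ihX hpX' hlX' (y::ys) hpY hlY)

-- ---------- the B side: the running-max sweep returns the minimal qualifying left ----------

theorem pvNoQual_extend0 {E0 E1 : List (List Int)} {slot : List Int} {d : Int} {m1 : Option Int}
    (hinv : pvMaxInv m1 E1)
    (hlen : ∀ s ∈ E0 ++ E1, 2 ≤ s.length) (hslot : 2 ≤ slot.length)
    (hord : ∀ s ∈ E0 ++ E1, s ≤ slot)
    (hnohit : ∀ o, m1 = some o → min (pvItem slot 1) o - pvItem slot 0 < d)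
    (hnoq : ∀ L, ¬ pvQual E0 E1 d L) :
    ∀ L, ¬ pvQual (E0 ++ [slot]) E1 d L := by
  rintro L ⟨x, hx, y, hy, hq, rfl⟩
  rcases List.mem_append.mp hx with hx | hx
  · exact hnoq _ ⟨x, hx, y, hy, hq, rfl⟩
  · have hxs : x = slot := by simpa using hx
    subst hxs
    rcases hinv with ⟨_, rfl⟩ | ⟨c, hc, ⟨s, hs, hsc⟩, hall⟩
    · simp at hy
    · have h0 : pvItem y 0 ≤ pvItem x 0 :=
        pvItem0_mono (hlen y (List.mem_append.mpr (Or.inr hy))) hslot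
          (hord y (List.mem_append.mpr (Or.inr hy)))
      have h1 : max (pvItem x 0) (pvItem y 0) = pvItem x 0 := max_eq_left h0
      have h2 : min (pvItem x 1) (pvItem y 1) ≤ min (pvItem x 1) c :=
        min_le_min le_rfl (hall y hy)
      have h3 := hnohit c hc
      linarith

theorem pvNoQual_extend1 {E0 E1 : List (List Int)} {slot : List Int} {d : Int} {m0 : Option Int}
    (hinv : pvMaxInv m0 E0)
    (hlen : ∀ s ∈ E0 ++ E1, 2 ≤ s.length) (hslot : 2 ≤ slot.length)
    (hord : ∀ s ∈ E0 ++ E1, s ≤ slot)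
    (hnohit : ∀ o, m0 = some o → min (pvItem slot 1) o - pvItem slot 0 < d)
    (hnoq : ∀ L, ¬ pvQual E0 E1 d L) :
    ∀ L, ¬ pvQual E0 (E1 ++ [slot]) d L := by
  have hlen' : ∀ s ∈ E1 ++ E0, 2 ≤ s.length :=
    fun s hs => hlen s (List.mem_append.mpr (List.mem_append.mp hs).symm)
  have hord' : ∀ s ∈ E1 ++ E0, s ≤ slot :=
    fun s hs => hord s (List.mem_append.mpr (List.mem_append.mp hs).symm)
  have hnoq' : ∀ L, ¬ pvQual E1 E0 d L := fun L h => hnoq L (pvQual_swap.mp h)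
  intro L h
  exact pvNoQual_extend0 hinv hlen' hslot hord' hnohit hnoq' L (pvQual_swap.mp h)

theorem pvMaxInv_extend {m : Option Int} {E : List (List Int)} {slot : List Int} :
    pvMaxInv m E →
    pvMaxInv (match m with
      | none => some (pvItem slot 1)
      | some c => if c < pvItem slot 1 then some (pvItem slot 1) else some c) (E ++ [slot]) := by
  intro hinv
  rcases hinv with ⟨rfl, rfl⟩ | ⟨c, rfl, ⟨s, hs, hsc⟩, hall⟩
  · exact Or.inr ⟨pvItem slot 1, rfl, ⟨slot, by simp, rfl⟩, by simp⟩
  · by_cases hlt : c < pvItem slot 1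
    · refine Or.inr ⟨pvItem slot 1, by simp [hlt], ⟨slot, by simp, rfl⟩, ?_⟩
      intro s' hs'
      rcases List.mem_append.mp hs' with hs' | hs'
      · exact le_of_lt (lt_of_le_of_lt (hall s' hs') hlt)
      · simp at hs'; subst hs'; exact le_refl _
    · refine Or.inr ⟨c, by simp [hlt], ⟨s, List.mem_append.mpr (Or.inl hs), hsc⟩, ?_⟩
      intro s' hs'
      rcases List.mem_append.mp hs' with hs' | hs'
      · exact hall s' hs'
      · simp at hs'; subst hs'; exact not_lt.mp hlt


theorem msB_loop_cons0 (slot : List Int) (rest : List (List Int × Int)) (d : Int)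
    (m0 m1 : Option Int) :
    msB_loop ((slot, (0:Int)) :: rest) d m0 m1 =
      if (match m1 with
          | none => false
          | some o => decide (d ≤ min (pvItem slot 1) o - pvItem slot 0)) then
        [pvItem slot 0, pvItem slot 0 + d]
      else msB_loop rest d (match m0 with
          | none => some (pvItem slot 1)
          | some c => if c < pvItem slot 1 then some (pvItem slot 1) else some c) m1 := rfl

theorem msB_loop_cons1 (slot : List Int) (rest : List (List Int × Int)) (d : Int)
    (m0 m1 : Option Int) :
    msB_loop ((slot, (1:Int)) :: rest) d m0 m1 =
      if (match m0 with
          | none => false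
          | some o => decide (d ≤ min (pvItem slot 1) o - pvItem slot 0)) then
        [pvItem slot 0, pvItem slot 0 + d]
      else msB_loop rest d m0 (match m1 with
          | none => some (pvItem slot 1)
          | some c => if c < pvItem slot 1 then some (pvItem slot 1) else some c) := rfl

theorem msB_loop_isAns (d : Int) : ∀ (M : List (List Int × Int)),
    ∀ (E0 E1 : List (List Int)) (m0 m1 : Option Int),
    (M.map Prod.fst).Pairwise (· ≤ ·) →
    (∀ e ∈ M, e.2 = 0 ∨ e.2 = 1) →
    (∀ s ∈ E0 ++ E1, 2 ≤ s.length) → (∀ e ∈ M, 2 ≤ e.1.length) →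
    (∀ s ∈ E0 ++ E1, ∀ e ∈ M, s ≤ e.1) →
    pvMaxInv m0 E0 → pvMaxInv m1 E1 →
    (∀ L, ¬ pvQual E0 E1 d L) →
    pvIsAns (E0 ++ (M.filter (fun e => e.2 == 0)).map Prod.fst)
            (E1 ++ (M.filter (fun e => e.2 == 1)).map Prod.fst) d (msB_loop M d m0 m1) := by
  intro M
  induction M with
  | nil =>
    intro E0 E1 m0 m1 _ _ _ _ _ _ _ hnoq
    simp only [msB_loop, List.filter_nil, List.map_nil, List.append_nil]
    exact Or.inl ⟨rfl, hnoq⟩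
  | cons ev rest ih =>
    obtain ⟨slot, w⟩ := ev
    intro E0 E1 m0 m1 hpair htag hlen hlenM hord hinv0 hinv1 hnoq
    have hw := htag (slot, w) (List.mem_cons_self)
    have hslotlen : 2 ≤ slot.length := hlenM (slot, w) (List.mem_cons_self)
    have hmc : (∀ (a' : List Int) (x : Int), (a', x) ∈ rest → slot ≤ a') ∧
        (rest.map Prod.fst).Pairwise (· ≤ ·) := by simpa using hpair
    have hslotle : ∀ e ∈ rest, slot ≤ e.1 :=
      fun e he => hmc.1 e.1 e.2 (by simpa using he)
    have hordslot : ∀ s ∈ E0 ++ E1, s ≤ slot :=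
      fun s hs => hord s hs (slot, w) (List.mem_cons_self)
    have htag' : ∀ e ∈ rest, e.2 = 0 ∨ e.2 = 1 :=
      fun e he => htag e (List.mem_cons_of_mem _ he)
    have hlenM' : ∀ e ∈ rest, 2 ≤ e.1.length :=
      fun e he => hlenM e (List.mem_cons_of_mem _ he)
    rcases hw with hw0 | hw1
    · -- which = 0 : the slot belongs to the first list
      have hw0' : w = 0 := hw0
      subst hw0'
      rw [msB_loop_cons0,
        List.filter_cons_of_pos (by simp), List.filter_cons_of_neg (by simp), List.map_cons]
      have hlen' : ∀ s ∈ (E0 ++ [slot]) ++ E1, 2 ≤ s.length := by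
        intro s hs
        rcases List.mem_append.mp hs with hs | hs
        · rcases List.mem_append.mp hs with hs | hs
          · exact hlen s (List.mem_append.mpr (Or.inl hs))
          · simp at hs; subst hs; exact hslotlen
        · exact hlen s (List.mem_append.mpr (Or.inr hs))
      have hord' : ∀ s ∈ (E0 ++ [slot]) ++ E1, ∀ e ∈ rest, s ≤ e.1 := by
        intro s hs e he
        rcases List.mem_append.mp hs with hs | hs
        · rcases List.mem_append.mp hs with hs | hs
          · exact hord s (List.mem_append.mpr (Or.inl hs)) e (List.mem_cons_of_mem _ he)
          · simp at hs; subst hs; exact hslotle e he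
        · exact hord s (List.mem_append.mpr (Or.inr hs)) e (List.mem_cons_of_mem _ he)
      have hadv : ∀ u : Option Int, pvMaxInv u (E0 ++ [slot]) →
          (∀ o, m1 = some o → min (pvItem slot 1) o - pvItem slot 0 < d) →
          pvIsAns (E0 ++ slot :: (rest.filter (fun e => e.2 == 0)).map Prod.fst)
                  (E1 ++ (rest.filter (fun e => e.2 == 1)).map Prod.fst) d
                  (msB_loop rest d u m1) := by
        intro u hu hnohit
        have hnoq' := pvNoQual_extend0 hinv1 hlen hslotlen hordslot hnohit hnoq
        have hres := ih (E0 ++ [slot]) E1 u m1 hmc.2 htag' hlen' hlenM' hord'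
          hu hinv1 hnoq'
        simpa [List.append_assoc] using hres
      cases m1 with
      | none =>
        rw [if_neg (by simp)]
        exact hadv _ (pvMaxInv_extend hinv0) (fun o h => by cases h)
      | some o =>
        by_cases hq : d ≤ min (pvItem slot 1) o - pvItem slot 0
        · rw [if_pos (by simpa using hq)]
          refine Or.inr ⟨pvItem slot 0, ?_, ?_, rfl⟩
          · rcases hinv1 with ⟨hno, _⟩ | ⟨c, hc, ⟨y, hy, hyc⟩, hall⟩
            · cases hno
            · have hco : o = c := by injection hc
              subst hco
              have hy0 : pvItem y 0 ≤ pvItem slot 0 :=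
                pvItem0_mono (hlen y (List.mem_append.mpr (Or.inr hy))) hslotlen
                  (hordslot y (List.mem_append.mpr (Or.inr hy)))
              refine ⟨slot, List.mem_append.mpr (Or.inr (by simp)), y,
                List.mem_append.mpr (Or.inl hy), ?_, (max_eq_left hy0).symm⟩
              rw [max_eq_left hy0, hyc]
              exact hq
          · rintro L' ⟨x', hx', y', hy', hq', rfl⟩
            rcases List.mem_append.mp hx' with hx' | hx'
            · rcases List.mem_append.mp hy' with hy' | hy'
              · exact absurd ⟨x', hx', y', hy', hq', rfl⟩ (hnoq _)
              · obtain ⟨e, he, rfl⟩ := List.mem_map.mp hy'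
                have he' := (List.mem_filter.mp he).1
                have h01 : pvItem slot 0 ≤ pvItem e.1 0 :=
                  pvItem0_mono hslotlen (hlenM' e he') (hslotle e he')
                exact le_trans h01 (le_max_right _ _)
            · rcases List.mem_cons.mp hx' with rfl | hx'
              · exact le_max_left _ _
              · obtain ⟨e, he, rfl⟩ := List.mem_map.mp hx'
                have he' := (List.mem_filter.mp he).1
                have h01 : pvItem slot 0 ≤ pvItem e.1 0 :=
                  pvItem0_mono hslotlen (hlenM' e he') (hslotle e he')
                exact le_trans h01 (le_max_left _ _)
        · rw [if_neg (by simpa using hq)]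
          exact hadv _ (pvMaxInv_extend hinv0) (fun o' h => by injection h with h'; subst h'; exact not_le.mp hq)
    · -- which = 1 : the slot belongs to the second list
      have hw1' : w = 1 := hw1
      subst hw1'
      rw [msB_loop_cons1,
        List.filter_cons_of_neg (by simp), List.filter_cons_of_pos (by simp), List.map_cons]
      have hlen' : ∀ s ∈ E0 ++ (E1 ++ [slot]), 2 ≤ s.length := by
        intro s hs
        rcases List.mem_append.mp hs with hs | hs
        · exact hlen s (List.mem_append.mpr (Or.inl hs))
        · rcases List.mem_append.mp hs with hs | hs
          · exact hlen s (List.mem_append.mpr (Or.inr hs))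
          · simp at hs; subst hs; exact hslotlen
      have hord' : ∀ s ∈ E0 ++ (E1 ++ [slot]), ∀ e ∈ rest, s ≤ e.1 := by
        intro s hs e he
        rcases List.mem_append.mp hs with hs | hs
        · exact hord s (List.mem_append.mpr (Or.inl hs)) e (List.mem_cons_of_mem _ he)
        · rcases List.mem_append.mp hs with hs | hs
          · exact hord s (List.mem_append.mpr (Or.inr hs)) e (List.mem_cons_of_mem _ he)
          · simp at hs; subst hs; exact hslotle e he
      have hadv : ∀ u : Option Int, pvMaxInv u (E1 ++ [slot]) →
          (∀ o, m0 = some o → min (pvItem slot 1) o - pvItem slot 0 < d) →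
          pvIsAns (E0 ++ (rest.filter (fun e => e.2 == 0)).map Prod.fst)
                  (E1 ++ slot :: (rest.filter (fun e => e.2 == 1)).map Prod.fst) d
                  (msB_loop rest d m0 u) := by
        intro u hu hnohit
        have hnoq' := pvNoQual_extend1 hinv0 hlen hslotlen hordslot hnohit hnoq
        have hres := ih E0 (E1 ++ [slot]) m0 u hmc.2 htag' hlen' hlenM' hord'
          hinv0 hu hnoq'
        simpa [List.append_assoc] using hres
      cases m0 with
      | none =>
        rw [if_neg (by simp)]
        exact hadv _ (pvMaxInv_extend hinv1) (fun o h => by cases h)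
      | some o =>
        by_cases hq : d ≤ min (pvItem slot 1) o - pvItem slot 0
        · rw [if_pos (by simpa using hq)]
          refine Or.inr ⟨pvItem slot 0, ?_, ?_, rfl⟩
          · rcases hinv0 with ⟨hno, _⟩ | ⟨c, hc, ⟨y, hy, hyc⟩, hall⟩
            · cases hno
            · have hco : o = c := by injection hc
              subst hco
              have hy0 : pvItem y 0 ≤ pvItem slot 0 :=
                pvItem0_mono (hlen y (List.mem_append.mpr (Or.inl hy))) hslotlen
                  (hordslot y (List.mem_append.mpr (Or.inl hy)))
              refine ⟨y, List.mem_append.mpr (Or.inl hy), slot,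
                List.mem_append.mpr (Or.inr (by simp)), ?_, (max_eq_right hy0).symm⟩
              rw [max_eq_right hy0, hyc, min_comm]
              exact hq
          · rintro L' ⟨x', hx', y', hy', hq', rfl⟩
            rcases List.mem_append.mp hy' with hy' | hy'
            · rcases List.mem_append.mp hx' with hx' | hx'
              · exact absurd ⟨x', hx', y', hy', hq', rfl⟩ (hnoq _)
              · obtain ⟨e, he, rfl⟩ := List.mem_map.mp hx'
                have he' := (List.mem_filter.mp he).1
                have h01 : pvItem slot 0 ≤ pvItem e.1 0 :=
                  pvItem0_mono hslotlen (hlenM' e he') (hslotle e he')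
                exact le_trans h01 (le_max_left _ _)
            · rcases List.mem_cons.mp hy' with rfl | hy'
              · exact le_max_right _ _
              · obtain ⟨e, he, rfl⟩ := List.mem_map.mp hy'
                have he' := (List.mem_filter.mp he).1
                have h01 : pvItem slot 0 ≤ pvItem e.1 0 :=
                  pvItem0_mono hslotlen (hlenM' e he') (hslotle e he')
                exact le_trans h01 (le_max_right _ _)
        · rw [if_neg (by simpa using hq)]
          exact hadv _ (pvMaxInv_extend hinv1) (fun o' h => by injection h with h'; subst h'; exact not_le.mp hq)

theorem pvQual_congr_mem {X X' Y Y' : List (List Int)} {d L : Int}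
    (hx : ∀ s, s ∈ X ↔ s ∈ X') (hy : ∀ s, s ∈ Y ↔ s ∈ Y') :
    pvQual X Y d L ↔ pvQual X' Y' d L := by
  unfold pvQual
  constructor <;> rintro ⟨x, hxm, y, hym, h⟩
  · exact ⟨x, (hx x).1 hxm, y, (hy y).1 hym, h⟩
  · exact ⟨x, (hx x).2 hxm, y, (hy y).2 hym, h⟩

-- the port's `sorted` elaborates with core's lexicographic `LT (List Int)`; the PySem order
-- lemmas use Mathlib's LinearOrder instance — the two relations coincide, so the sorts agree
theorem pvSorted_inst {α : Type} {di : DecidableLT (List Int)} (xs : List α) (key : α → List Int) :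
    @PySem.List.sorted α (List Int) List.instLT di xs key false =
    @PySem.List.sorted α (List Int)
      (@Preorder.toLT _ (@PartialOrder.toPreorder _ (@LinearOrder.toPartialOrder _ List.instLinearOrder)))
      (@LinearOrder.toDecidableLT _ List.instLinearOrder) xs key false := by
  rw [PySem.List.sorted_eq_foldl_insertBy]
  congr 1
  funext acc x
  congr 1
  funext a b
  exact decide_eq_decide.mpr ((List.lt_iff_lex_lt _ _).trans Iff.rfl)

-- ===== VERDICT (by name: the statement is the Claim_ definition above) =====
theorem meeting_schedule_spec : Claim_equal_meeting_schedule := by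
  unfold Claim_equal_meeting_schedule
  intro slots1 slots2 d _hdom hpre
  unfold Spec_meeting_schedule meeting_schedule meeting_schedule_alt
  simp only []
  have hl1 : ∀ s ∈ PySem.List.sorted slots1 (fun x => x) false, 2 ≤ s.length := by
    intro s hs
    exact hpre s (List.mem_append.mpr (Or.inl ((PySem.List.mem_sorted _ _ _ _).mp hs)))
  have hl2 : ∀ s ∈ PySem.List.sorted slots2 (fun x => x) false, 2 ≤ s.length := by
    intro s hs
    exact hpre s (List.mem_append.mpr (Or.inr ((PySem.List.mem_sorted _ _ _ _).mp hs)))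
  have hp1 : (PySem.List.sorted slots1 (fun x => x) false).Pairwise (· ≤ ·) := by
    rw [pvSorted_inst]
    simpa using PySem.List.sorted_pairwise slots1 (fun x => x)
  have hp2 : (PySem.List.sorted slots2 (fun x => x) false).Pairwise (· ≤ ·) := by
    rw [pvSorted_inst]
    simpa using PySem.List.sorted_pairwise slots2 (fun x => x)
  have hA : pvIsAns (PySem.List.sorted slots1 (fun x => x) false)
      (PySem.List.sorted slots2 (fun x => x) false) d
      (msA_go (PySem.List.sorted slots1 (fun x => x) false)
        (PySem.List.sorted slots2 (fun x => x) false) d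
        ((PySem.List.sorted slots1 (fun x => x) false).length +
         (PySem.List.sorted slots2 (fun x => x) false).length + 1) 0 0) := by
    rw [msA_go_eq_list _ _ _ _ _ _ (by omega)]
    simp only [List.drop_zero]
    exact msA_list_isAns d _ hp1 hl1 _ hp2 hl2
  -- the merged, start-sorted event list of B
  have hMpair : ((PySem.List.sorted
      ((PySem.List.sorted slots1 (fun x => x) false).map (fun s => (s, (0:Int))) ++
       (PySem.List.sorted slots2 (fun x => x) false).map (fun s => (s, (1:Int))))
      (fun e => e.1) false).map Prod.fst).Pairwise (· ≤ ·) := by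
    rw [pvSorted_inst]
    rw [List.pairwise_map]
    exact PySem.List.sorted_pairwise _ _
  have hMtag : ∀ e ∈ PySem.List.sorted
      ((PySem.List.sorted slots1 (fun x => x) false).map (fun s => (s, (0:Int))) ++
       (PySem.List.sorted slots2 (fun x => x) false).map (fun s => (s, (1:Int))))
      (fun e => e.1) false, e.2 = 0 ∨ e.2 = 1 := by
    intro e he
    rcases List.mem_append.mp ((PySem.List.mem_sorted _ _ _ _).mp he) with h | h
    · obtain ⟨s', _, rfl⟩ := List.mem_map.mp h; exact Or.inl rfl
    · obtain ⟨s', _, rfl⟩ := List.mem_map.mp h; exact Or.inr rfl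
  have hMlen : ∀ e ∈ PySem.List.sorted
      ((PySem.List.sorted slots1 (fun x => x) false).map (fun s => (s, (0:Int))) ++
       (PySem.List.sorted slots2 (fun x => x) false).map (fun s => (s, (1:Int))))
      (fun e => e.1) false, 2 ≤ e.1.length := by
    intro e he
    rcases List.mem_append.mp ((PySem.List.mem_sorted _ _ _ _).mp he) with h | h
    · obtain ⟨s', hs', rfl⟩ := List.mem_map.mp h; exact hl1 s' hs'
    · obtain ⟨s', hs', rfl⟩ := List.mem_map.mp h; exact hl2 s' hs'
  have hB := msB_loop_isAns d
    (PySem.List.sorted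
      ((PySem.List.sorted slots1 (fun x => x) false).map (fun s => (s, (0:Int))) ++
       (PySem.List.sorted slots2 (fun x => x) false).map (fun s => (s, (1:Int))))
      (fun e => e.1) false)
    [] [] none none hMpair hMtag (by intro s hs; simp at hs) hMlen
    (by intro s hs; simp at hs) (Or.inl ⟨rfl, rfl⟩) (Or.inl ⟨rfl, rfl⟩)
    (by rintro L ⟨x, hx, _⟩; simp at hx)
  simp only [List.nil_append] at hB
  have hmem0 : ∀ s, s ∈ ((PySem.List.sorted
      ((PySem.List.sorted slots1 (fun x => x) false).map (fun s => (s, (0:Int))) ++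
       (PySem.List.sorted slots2 (fun x => x) false).map (fun s => (s, (1:Int))))
      (fun e => e.1) false).filter (fun e => e.2 == 0)).map Prod.fst ↔
      s ∈ PySem.List.sorted slots1 (fun x => x) false := by
    intro s
    constructor
    · intro hs
      obtain ⟨e, he, rfl⟩ := List.mem_map.mp hs
      obtain ⟨heM, htg⟩ := List.mem_filter.mp he
      rcases List.mem_append.mp ((PySem.List.mem_sorted _ _ _ _).mp heM) with h | h
      · obtain ⟨s', hs', rfl⟩ := List.mem_map.mp h; exact hs'
      · obtain ⟨s', _, rfl⟩ := List.mem_map.mp h; simp at htg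
    · intro hs
      refine List.mem_map.mpr ⟨(s, 0), List.mem_filter.mpr ⟨?_, by simp⟩, rfl⟩
      exact (PySem.List.mem_sorted _ _ _ _).mpr (List.mem_append.mpr (Or.inl (List.mem_map.mpr ⟨s, hs, rfl⟩)))
  have hmem1 : ∀ s, s ∈ ((PySem.List.sorted
      ((PySem.List.sorted slots1 (fun x => x) false).map (fun s => (s, (0:Int))) ++
       (PySem.List.sorted slots2 (fun x => x) false).map (fun s => (s, (1:Int))))
      (fun e => e.1) false).filter (fun e => e.2 == 1)).map Prod.fst ↔
      s ∈ PySem.List.sorted slots2 (fun x => x) false := by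
    intro s
    constructor
    · intro hs
      obtain ⟨e, he, rfl⟩ := List.mem_map.mp hs
      obtain ⟨heM, htg⟩ := List.mem_filter.mp he
      rcases List.mem_append.mp ((PySem.List.mem_sorted _ _ _ _).mp heM) with h | h
      · obtain ⟨s', _, rfl⟩ := List.mem_map.mp h; simp at htg
      · obtain ⟨s', hs', rfl⟩ := List.mem_map.mp h; exact hs'
    · intro hs
      refine List.mem_map.mpr ⟨(s, 1), List.mem_filter.mpr ⟨?_, by simp⟩, rfl⟩
      exact (PySem.List.mem_sorted _ _ _ _).mpr (List.mem_append.mpr (Or.inr (List.mem_map.mpr ⟨s, hs, rfl⟩)))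
  have hB' := pvIsAns_of_qual_iff (fun L => pvQual_congr_mem hmem0 hmem1) hB
  exact pvIsAns_unique hA hB'
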